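-- pv_equiv track=rewrite | github.com/wchungg/basketball-game-analysis | backend/app/pass_steal_detector/pass_steal_detector.py | detect_steal
-- ===== SOURCE A (Python) =====
-- def detect_steal(ball_acquisition, player_assignment):
--     steals = [-1] * len(ball_acquisition)
--     prev_holder = -1
--     prev_frame = -1
--
--     for frame in range(1, len(ball_acquisition)):
--         if ball_acquisition[frame - 1] != -1:
--             prev_holder = ball_acquisition[frame - 1]
--             prev_frame = frame - 1
--
--         current_holder = ball_acquisition[frame]
--
--         if prev_holder != -1 and current_holder != -1 and prev_holder != current_holder:
--             prev_team = player_assignment[prev_frame].get(prev_holder, -1)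
--             current_team = player_assignment[frame].get(current_holder, -1)
--
--             if prev_team != current_team and prev_team != -1 and current_team != -1:
--                 steals[frame] = current_team
--
--     return steals
-- ===== SOURCE B (Python) =====
-- def detect_steal(ball_acquisition, player_assignment):
--     # Per-frame recomputation: each frame independently searches backwards for the
--     # nearest earlier valid frame and decides its own steal mark; no carried state.
--     def steal_at(frame):
--         cur = ball_acquisition[frame]
--         if cur == -1:
--             return -1
--         for i in range(frame - 1, -1, -1):
--             prev = ball_acquisition[i]
--             if prev != -1:
--                 if prev == cur:
--                     return -1
--                 prev_team = player_assignment[i].get(prev, -1)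
--                 cur_team = player_assignment[frame].get(cur, -1)
--                 if prev_team != cur_team and prev_team != -1 and cur_team != -1:
--                     return cur_team
--                 return -1
--         return -1
--     return [steal_at(frame) for frame in range(len(ball_acquisition))]
-- ===== Notes on version B (the rewrite author's own statement) =====
-- stated objective: alternative
-- what changed: Replaces A's single stateful forward sweep (carrying prev_holder/prev_frame across iterations) with a stateless per-frame recomputation: each frame independently scans backwards for the nearest earlier valid frame and decides its own mark, and the result is built as one comprehension instead of mutating a preallocated list.
import Mathlib
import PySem

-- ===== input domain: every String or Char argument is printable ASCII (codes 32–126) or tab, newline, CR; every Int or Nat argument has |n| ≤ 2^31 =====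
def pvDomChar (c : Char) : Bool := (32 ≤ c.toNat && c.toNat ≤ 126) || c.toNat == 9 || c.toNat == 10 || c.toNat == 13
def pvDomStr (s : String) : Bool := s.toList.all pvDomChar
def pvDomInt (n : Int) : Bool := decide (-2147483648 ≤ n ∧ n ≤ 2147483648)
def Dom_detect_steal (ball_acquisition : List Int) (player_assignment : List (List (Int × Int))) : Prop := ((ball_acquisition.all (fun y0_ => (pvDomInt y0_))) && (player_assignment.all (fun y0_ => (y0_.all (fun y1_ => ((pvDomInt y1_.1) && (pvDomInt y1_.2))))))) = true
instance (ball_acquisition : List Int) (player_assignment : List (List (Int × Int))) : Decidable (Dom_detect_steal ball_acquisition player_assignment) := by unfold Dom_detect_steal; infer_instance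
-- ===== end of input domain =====

-- B replaces A's stateful forward sweep (carrying prev_holder/prev_frame across iterations) with a
-- stateless per-frame recomputation: each frame independently scans backwards for the nearest earlier
-- valid frame and decides its own mark; the result is one comprehension, no list mutation.

-- d.get(k, dflt) on a Python dict passed as an association list: first matching key, else the default (exact).
def pyDictGetD (d : List (Int × Int)) (k dflt : Int) : Int :=
  match d.find? (fun p => p.1 == k) with
  | some p => p.2
  | none => dflt

-- ===== PORT A =====
-- loop body of A's 'for frame in range(1, len(ball_acquisition))'; state = (steals, prev_holder, prev_frame)
def stepA (ball_acquisition : List Int) (player_assignment : List (List (Int × Int)))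
    (st : List Int × Int × Int) (frame : Int) : List Int × Int × Int :=
  let prev :=
    if PySem.List.pyGetD ball_acquisition (frame - 1) (-1) ≠ -1 then
      (PySem.List.pyGetD ball_acquisition (frame - 1) (-1), frame - 1)
    else st.2
  let current_holder := PySem.List.pyGetD ball_acquisition frame (-1)
  let steals :=
    if prev.1 ≠ -1 ∧ current_holder ≠ -1 ∧ prev.1 ≠ current_holder then
      let prev_team := pyDictGetD (PySem.List.pyGetD player_assignment prev.2 []) prev.1 (-1)
      let current_team := pyDictGetD (PySem.List.pyGetD player_assignment frame []) current_holder (-1)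
      if prev_team ≠ current_team ∧ prev_team ≠ -1 ∧ current_team ≠ -1 then
        PySem.List.pySetD st.1 frame current_team
      else st.1
    else st.1
  (steals, prev)

def detect_steal (ball_acquisition : List Int) (player_assignment : List (List (Int × Int))) : List Int :=
  ((PySem.List.pyRange 1 (ball_acquisition.length : Int) 1).foldl
      (stepA ball_acquisition player_assignment)
      (List.replicate ball_acquisition.length (-1), -1, -1)).1

-- ===== PORT B =====
-- B's inner 'for i in range(frame-1, -1, -1)' with its early returns, as the obvious downward
-- recursion on the index (fuel m = i + 1, i.e. the next index inspected is m - 1).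
def backB (ball_acquisition : List Int) (player_assignment : List (List (Int × Int)))
    (frame : Nat) (cur : Int) : Nat → Int
  | 0 => -1
  | i + 1 =>
    let prev := PySem.List.pyGetD ball_acquisition (i : Int) (-1)
    if prev ≠ -1 then
      if prev = cur then -1
      else
        let prev_team := pyDictGetD (PySem.List.pyGetD player_assignment (i : Int) []) prev (-1)
        let cur_team := pyDictGetD (PySem.List.pyGetD player_assignment (frame : Int) []) cur (-1)
        if prev_team ≠ cur_team ∧ prev_team ≠ -1 ∧ cur_team ≠ -1 then cur_team else -1
    else backB ball_acquisition player_assignment frame cur i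

-- B's steal_at(frame)
def stealAt (ball_acquisition : List Int) (player_assignment : List (List (Int × Int))) (frame : Nat) : Int :=
  let cur := PySem.List.pyGetD ball_acquisition (frame : Int) (-1)
  if cur = -1 then -1
  else backB ball_acquisition player_assignment frame cur frame

def detect_steal_alt (ball_acquisition : List Int) (player_assignment : List (List (Int × Int))) : List Int :=
  (List.range ball_acquisition.length).map (stealAt ball_acquisition player_assignment)

-- ===== PRECONDITION & SPEC =====
-- Pre_ excludes exactly the inputs on which A raises IndexError: a pair of consecutive valid frames with
-- differing holders whose later frame index is beyond the end of player_assignment (B raises there too).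
def Pre_detect_steal (ball_acquisition : List Int) (player_assignment : List (List (Int × Int))) : Prop :=
  ∀ j ∈ List.range ball_acquisition.length,
    ball_acquisition.getD j (-1) ≠ -1 →
      ∀ i ∈ List.range j,
        ball_acquisition.getD i (-1) ≠ -1 →
          ball_acquisition.getD i (-1) ≠ ball_acquisition.getD j (-1) →
          (∀ k ∈ List.range j, i < k → ball_acquisition.getD k (-1) = -1) →
          j < player_assignment.length
instance (ball_acquisition : List Int) (player_assignment : List (List (Int × Int))) : Decidable (Pre_detect_steal ball_acquisition player_assignment) := by unfold Pre_detect_steal; infer_instance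

def pvWitness_detect_steal : List Int × (List (List (Int × Int))) :=
  ([3, -1, 5], [[(3, 0)], [], [(5, 1)]])

def Spec_detect_steal (ball_acquisition : List Int) (player_assignment : List (List (Int × Int))) (out : List Int) : Prop := out = detect_steal_alt ball_acquisition player_assignment
instance (ball_acquisition : List Int) (player_assignment : List (List (Int × Int))) (out : List Int) : Decidable (Spec_detect_steal ball_acquisition player_assignment out) := by unfold Spec_detect_steal; infer_instance

-- ===== CLAIM (what is proved, stated in full; the proofs are below) =====
def Claim_equal_detect_steal : Prop := ∀ (ball_acquisition : List Int) (player_assignment : List (List (Int × Int))), Dom_detect_steal ball_acquisition player_assignment → Pre_detect_steal ball_acquisition player_assignment → Spec_detect_steal ball_acquisition player_assignment (detect_steal ball_acquisition player_assignment)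

-- ===== LEMMAS AND PROOFS =====

-- last valid frame among indices < m ('none' if there is none)
def lv (ba : List Int) : Nat → Option (Int × Int)
  | 0 => none
  | m + 1 => if ba.getD m (-1) ≠ -1 then some ((m : Int), ba.getD m (-1)) else lv ba m

-- A's (prev_holder, prev_frame) encoding of the last valid frame
def pvEnc : Option (Int × Int) → Int × Int
  | none => (-1, -1)
  | some (i, h) => (h, i)

-- the mark decided from a current holder and the (optional) last valid frame before it
def decide2 (pa : List (List (Int × Int))) (frame cur : Int) : Option (Int × Int) → Int
  | none => -1
  | some (i, prev) =>
    if prev = cur then -1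
    else
      let pt := pyDictGetD (PySem.List.pyGetD pa i []) prev (-1)
      let ct := pyDictGetD (PySem.List.pyGetD pa frame []) cur (-1)
      if pt ≠ ct ∧ pt ≠ -1 ∧ ct ≠ -1 then ct else -1

-- the common per-index characterization of both programs' output at index j
def valAt (ba : List Int) (pa : List (List (Int × Int))) (j : Nat) : Int :=
  let cur := PySem.List.pyGetD ba (j : Int) (-1)
  if cur = -1 then -1 else decide2 pa (j : Int) cur (lv ba j)

-- the list after A has processed frames 1..m-1
def Sfun (ba : List Int) (pa : List (List (Int × Int))) (m : Nat) : List Int :=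
  (List.range ba.length).map (fun j => if j < m then valAt ba pa j else -1)

lemma lv_succ (ba : List Int) (m : Nat) :
    lv ba (m + 1) = if ba.getD m (-1) ≠ -1 then some ((m : Int), ba.getD m (-1)) else lv ba m := rfl

lemma lv_snd_ne (ba : List Int) : ∀ m i p, lv ba m = some (i, p) → p ≠ -1 := by
  intro m
  induction m with
  | zero => intro i p h; simp [lv] at h
  | succ m ih =>
    intro i p h
    rw [lv_succ] at h
    split_ifs at h with hv
    · simp only [Option.some.injEq, Prod.mk.injEq] at h
      exact h.2 ▸ hv
    · exact ih i p h

-- B's backward scan computes the decision on the last valid frame before m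
lemma backB_eq (ba : List Int) (pa : List (List (Int × Int))) (frame : Nat) (cur : Int) :
    ∀ m, backB ba pa frame cur m = decide2 pa (frame : Int) cur (lv ba m) := by
  intro m
  induction m with
  | zero => rfl
  | succ m ih =>
    rw [lv_succ]
    simp only [backB, PySem.List.pyGetD_natCast]
    by_cases h : ba.getD m (-1) = -1
    · rw [if_neg (not_not_intro h), if_neg (not_not_intro h), ih]
    · rw [if_pos h, if_pos h]
      simp [decide2]

lemma stealAt_eq_valAt (ba : List Int) (pa : List (List (Int × Int))) (j : Nat) :
    stealAt ba pa j = valAt ba pa j := by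
  unfold stealAt valAt
  by_cases h : PySem.List.pyGetD ba (j : Int) (-1) = -1
  · simp [h]
  · simp only [if_neg h, backB_eq]

-- steps of A, phrased on the last-valid-frame option (same as A's loop body under the invariant)
def stepB (player_assignment : List (List (Int × Int)))
    (steals : List Int) (pq : (Int × Int) × (Int × Int)) : List Int :=
  if pq.1.2 ≠ pq.2.2 then
    let prev_team := pyDictGetD (PySem.List.pyGetD player_assignment pq.1.1 []) pq.1.2 (-1)
    let cur_team := pyDictGetD (PySem.List.pyGetD player_assignment pq.2.1 []) pq.2.2 (-1)
    if prev_team ≠ cur_team ∧ prev_team ≠ -1 ∧ cur_team ≠ -1 then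
      PySem.List.pySetD steals pq.2.1 cur_team
    else steals
  else steals

def goStepA (pa : List (List (Int × Int))) (st : List Int) (j cur : Int) :
    Option (Int × Int) → List Int
  | none => st
  | some p => if cur = -1 then st else stepB pa st (p, (j, cur))

-- the value of A's loop body at frame j, given that its carried state encodes the last valid frame before j
lemma stepA_eq (ba : List Int) (pa : List (List (Int × Int))) (j : Nat) (st : List Int)
    (hj : 1 ≤ j) :
    stepA ba pa (st, pvEnc (lv ba (j - 1))) (j : Int)
      = (goStepA pa st (j : Int) (ba.getD j (-1)) (lv ba j), pvEnc (lv ba j)) := by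
  have hidx : (j : Int) - 1 = ((j - 1 : Nat) : Int) := by omega
  have hj' : j = (j - 1) + 1 := by omega
  simp only [stepA, hidx, PySem.List.pyGetD_natCast]
  have hprev : (if ba.getD (j - 1) (-1) ≠ -1
        then (ba.getD (j - 1) (-1), ((j - 1 : Nat) : Int))
        else (st, pvEnc (lv ba (j - 1))).2)
      = pvEnc (lv ba j) := by
    conv_rhs => rw [hj', lv_succ]
    split_ifs with h
    · rfl
    · rfl
  rw [hprev]
  cases hv : lv ba j with
  | none =>
    simp [pvEnc, goStepA]
  | some p =>
    obtain ⟨i, ph⟩ := p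
    have hph : ph ≠ -1 := lv_snd_ne ba j i ph hv
    by_cases hcur : ba.getD j (-1) = -1 <;> by_cases hpc : ph = ba.getD j (-1) <;>
      rw [List.getD_eq_getElem?_getD] at hcur hpc <;>
      simp [pvEnc, stepB, goStepA, hph, hcur, hpc]

lemma valAt_cur (ba : List Int) (pa : List (List (Int × Int))) (j : Nat) :
    valAt ba pa j = if ba.getD j (-1) = -1 then -1 else decide2 pa (j : Int) (ba.getD j (-1)) (lv ba j) := by
  unfold valAt
  simp [PySem.List.pyGetD_natCast]

lemma Sfun_succ_of_neg (ba : List Int) (pa : List (List (Int × Int))) (m : Nat)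
    (h : valAt ba pa m = -1) : Sfun ba pa (m + 1) = Sfun ba pa m := by
  unfold Sfun
  apply List.map_congr_left
  intro j hj
  rcases lt_trichotomy j m with h1 | h1 | h1
  · simp [h1, Nat.lt_succ_of_lt h1]
  · subst h1; simp [h]
  · rw [if_neg (by omega), if_neg (by omega)]

lemma Sfun_succ_set (ba : List Int) (pa : List (List (Int × Int))) (m : Nat) :
    Sfun ba pa (m + 1) = (Sfun ba pa m).set m (valAt ba pa m) := by
  unfold Sfun
  apply List.ext_getElem
  · simp
  · intro j hj hj'
    simp only [List.getElem_map, List.getElem_range, List.getElem_set]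
    rcases lt_trichotomy j m with h1 | h1 | h1
    · rw [if_pos (by omega), if_neg (by omega), if_pos h1]
    · subst h1
      rw [if_pos (by omega), if_pos rfl]
    · rw [if_neg (by omega), if_neg (by omega), if_neg (by omega)]

-- A's loop body maps Sfun m to Sfun (m+1)
lemma update_eq (ba : List Int) (pa : List (List (Int × Int))) (m : Nat) :
    goStepA pa (Sfun ba pa m) (m : Int) (ba.getD m (-1)) (lv ba m) = Sfun ba pa (m + 1) := by
  cases hv : lv ba m with
  | none =>
    have hval : valAt ba pa m = -1 := by
      rw [valAt_cur, hv]; split_ifs <;> rfl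
    rw [Sfun_succ_of_neg ba pa m hval]; rfl
  | some p =>
    obtain ⟨i, prev⟩ := p
    by_cases hcur : ba.getD m (-1) = -1
    · have hval : valAt ba pa m = -1 := by rw [valAt_cur, if_pos hcur]
      rw [Sfun_succ_of_neg ba pa m hval]
      simp only [goStepA]
      rw [if_pos hcur]
    · simp only [goStepA, if_neg hcur, stepB]
      by_cases hpc : prev = ba.getD m (-1)
      · have hval : valAt ba pa m = -1 := by
          rw [valAt_cur, if_neg hcur, hv, decide2, if_pos hpc]
        rw [Sfun_succ_of_neg ba pa m hval, if_neg (not_not_intro hpc)]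
      · rw [if_pos hpc]
        set pt := pyDictGetD (PySem.List.pyGetD pa i []) prev (-1) with hpt
        set ct := pyDictGetD (PySem.List.pyGetD pa (m : Int) []) (ba.getD m (-1)) (-1) with hct
        by_cases hcond : pt ≠ ct ∧ pt ≠ -1 ∧ ct ≠ -1
        · have hval : valAt ba pa m = ct := by
            rw [valAt_cur, if_neg hcur, hv, decide2, if_neg hpc]
            simp only [← hpt, ← hct, if_pos hcond]
          rw [if_pos hcond, Sfun_succ_set, hval, PySem.List.pySetD_natCast]
        · have hval : valAt ba pa m = -1 := by
            rw [valAt_cur, if_neg hcur, hv, decide2, if_neg hpc]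
            simp only [← hpt, ← hct, if_neg hcond]
          rw [if_neg hcond, Sfun_succ_of_neg ba pa m hval]

lemma valAt_zero (ba : List Int) (pa : List (List (Int × Int))) :
    valAt ba pa 0 = -1 := by
  rw [valAt_cur]; split_ifs <;> rfl

lemma Sfun_one (ba : List Int) (pa : List (List (Int × Int))) :
    Sfun ba pa 1 = List.replicate ba.length (-1) := by
  unfold Sfun
  apply List.ext_getElem
  · simp
  · intro j hj hj'
    simp only [List.getElem_map, List.getElem_range, List.getElem_replicate]
    split_ifs with h
    · have : j = 0 := by omega
      subst this; exact valAt_zero ba pa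
    · rfl

-- the central invariant: A's loop, having processed frames 1..k, holds Sfun (1+k) and the last valid frame < 1+k... (state after processing pyRange 1 (1+k))
lemma mainA (ba : List Int) (pa : List (List (Int × Int))) :
    ∀ k, 1 + k ≤ ba.length →
      List.foldl (stepA ba pa) (Sfun ba pa 1, pvEnc (lv ba 0)) (PySem.List.pyRange 1 ((1 + k : Nat) : Int) 1)
        = (Sfun ba pa (1 + k), pvEnc (lv ba k)) := by
  intro k
  induction k with
  | zero =>
    intro _
    rw [show ((1 + 0 : Nat) : Int) = 1 by norm_num, PySem.List.pyRange_one_eq_nil (le_refl _)]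
    rfl
  | succ k ih =>
    intro hk
    have hcast : ((1 + (k + 1) : Nat) : Int) = ((1 + k : Nat) : Int) + 1 := by push_cast; ring
    rw [hcast, PySem.List.pyRange_one_succ_right (by push_cast; omega), List.foldl_append,
        ih (by omega), List.foldl_cons, List.foldl_nil]
    have hsub : (1 + k) - 1 = k := by omega
    have := stepA_eq ba pa (1 + k) (Sfun ba pa (1 + k)) (by omega)
    rw [hsub] at this
    rw [this, update_eq ba pa (1 + k)]
    have h2 : 1 + (k + 1) = 1 + k + 1 := by omega
    have h3 : k + 1 = 1 + k := by omega
    rw [h2, h3]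

lemma Sfun_top (ba : List Int) (pa : List (List (Int × Int))) :
    Sfun ba pa ba.length = detect_steal_alt ba pa := by
  unfold Sfun detect_steal_alt
  apply List.map_congr_left
  intro j hj
  rw [List.mem_range] at hj
  rw [if_pos hj, stealAt_eq_valAt]

theorem ports_eq (ba : List Int) (pa : List (List (Int × Int))) :
    detect_steal ba pa = detect_steal_alt ba pa := by
  rcases Nat.eq_zero_or_pos ba.length with h0 | hpos
  · have hba : ba = [] := List.eq_nil_of_length_eq_zero h0
    subst hba
    rfl
  · unfold detect_steal
    have hk : 1 + (ba.length - 1) = ba.length := by omega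
    have hrep : List.replicate ba.length (-1 : Int) = Sfun ba pa 1 := (Sfun_one ba pa).symm
    have henc : ((-1 : Int), (-1 : Int)) = pvEnc (lv ba 0) := rfl
    rw [hrep, henc, show (ba.length : Int) = ((1 + (ba.length - 1) : Nat) : Int) by omega,
        mainA ba pa (ba.length - 1) (by omega)]
    rw [hk, Sfun_top]

-- ===== VERDICT (by name: the statement is the Claim_ definition above) =====
theorem detect_steal_spec : Claim_equal_detect_steal := by
  intro ba pa _ _
  unfold Spec_detect_steal
  exact ports_eq ba pa
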